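-- pv_equiv track=rewrite | github.com/weed478/wdi6 | zad06.py | zad6
-- ===== SOURCE A (Python) =====
-- end = None
--
-- def zad6(T):
--     best_len = None
--     best_sum = None
--
--     for mask in range(1, 1 << len(tab)):
--         i_sum = 0
--         v_sum = 0
--         length = 0
--
--         i = 0
--         while mask > 0:
--             mask, rem = divmod(mask, 2)
--             if rem == 1:
--                 i_sum += i
--                 v_sum += T[i]
--             end
--
--             length += rem
--             i += 1
--         end
--
--         if i_sum == v_sum:
--             if best_len is None or length < best_len:
--                 best_sum = i_sum
--                 best_len = length
--             end
--         end
--     end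
--
--     return best_sum
--
-- tab = [1, 7, 3, 5, 11, 2]
-- ===== SOURCE B (Python) =====
-- tab = [1, 7, 3, 5, 11, 2]
--
-- def bits(mask):
--     # indices of set bits of mask (within the fixed index range of tab)
--     return [i for i in range(len(tab)) if mask // 2**i % 2 == 1]
--
-- def zad6(T):
--     # size-major search: smallest subset size first, masks in ascending order within a size
--     for k in range(1, len(tab) + 1):
--         for mask in range(1, 1 << len(tab)):
--             idx = bits(mask)
--             if len(idx) != k:
--                 continue
--             i_sum = sum(idx)
--             v_sum = sum(T[i] for i in idx)
--             if i_sum == v_sum: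
--                 return i_sum
--     return None
-- ===== Notes on version B (the rewrite author's own statement) =====
-- stated objective: alternative
-- what changed: A makes one ascending scan over all 63 masks tracking a running minimum subset length; B searches size-major (subset size k = 1..6, masks in ascending order within each size) and returns the first hit immediately, with set-bit indices obtained from a comprehension instead of A's divmod-peeling while loop.
import Mathlib
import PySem

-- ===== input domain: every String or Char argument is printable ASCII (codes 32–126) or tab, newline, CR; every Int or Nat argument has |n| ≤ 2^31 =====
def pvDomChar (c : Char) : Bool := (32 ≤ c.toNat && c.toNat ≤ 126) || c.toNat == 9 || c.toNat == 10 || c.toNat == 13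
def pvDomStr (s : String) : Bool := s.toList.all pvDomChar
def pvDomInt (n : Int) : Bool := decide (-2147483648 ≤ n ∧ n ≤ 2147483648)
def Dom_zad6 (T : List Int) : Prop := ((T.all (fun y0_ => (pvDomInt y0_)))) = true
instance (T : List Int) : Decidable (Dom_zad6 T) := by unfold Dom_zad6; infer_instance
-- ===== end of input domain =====

-- B replaces A's single running-minimum scan over all masks by a size-major search (smallest
-- subset size first, masks ascending within a size) that returns the first hit immediately;
-- same return value wherever A returns (which requires len(T) ≥ len(tab) = 6).

-- ===== PORT A =====
def tabA : List Int := [1, 7, 3, 5, 11, 2]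

-- A's inner 'while mask > 0' loop, fuel-indexed (fuel ≥ mask.toNat + 1 suffices; the wrapper
-- supplies it).  'none' = IndexError from T[i].
def zad6InnerF (T : List Int) : Nat → Int → Int → Int → Int → Int → Option (Int × Int × Int)
  | 0, _, _, _, _, _ => none
  | fuel + 1, mask, i, iSum, vSum, length =>
    if 0 < mask then
      let q := PySem.Int.floordiv mask 2
      let r := PySem.Int.mod mask 2
      if r == 1 then
        match PySem.List.pyGet? T i with
        | none => none
        | some v => zad6InnerF T fuel q (i + 1) (iSum + i) (vSum + v) (length + r)
      else
        zad6InnerF T fuel q (i + 1) iSum vSum (length + r)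
    else
      some (iSum, vSum, length)

def zad6Inner (T : List Int) (mask : Int) : Option (Int × Int × Int) :=
  zad6InnerF T (mask.toNat + 1) mask 0 0 0 0

-- A's 'for mask in range(1, 1 << len(tab))' loop carrying (best_len, best_sum)
def zad6Loop (T : List Int) : List Int → Option Int → Option Int → Option Int
  | [], _, bestSum => bestSum
  | mask :: rest, bestLen, bestSum =>
    match zad6Inner T mask with
    | none => none   -- Python raises IndexError here (outside Pre_)
    | some (iSum, vSum, length) =>
      if iSum == vSum then
        match bestLen with
        | none => zad6Loop T rest (some length) (some iSum)
        | some bl =>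
          if length < bl then zad6Loop T rest (some length) (some iSum)
          else zad6Loop T rest bestLen bestSum
      else zad6Loop T rest bestLen bestSum

def zad6 (T : List Int) : Option Int :=
  zad6Loop T (PySem.List.pyRange 1 ((1 : Int) <<< tabA.length) 1) none none

-- ===== PORT B =====
def tabB : List Int := [1, 7, 3, 5, 11, 2]

-- bits(mask): indices i in range(len(tab)) with mask // 2**i % 2 == 1
-- (i comes from pyRange 0 6 so 0 ≤ i and i.toNat is exact for the exponent)
def bitsB (mask : Int) : List Int :=
  (PySem.List.pyRange 0 (tabB.length : Int) 1).filter
    (fun i => PySem.Int.mod (PySem.Int.floordiv mask ((2 : Int) ^ i.toNat)) 2 == 1)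

-- sum(idx)
def sumIdx : List Int → Int
  | [] => 0
  | i :: r => i + sumIdx r

-- sum(T[i] for i in idx); none = IndexError
def sumVals (T : List Int) : List Int → Option Int
  | [] => some 0
  | i :: r =>
    match PySem.List.pyGet? T i with
    | none => none
    | some v =>
      match sumVals T r with
      | none => none
      | some s => some (v + s)

-- inner 'for mask in range(1, 1 << len(tab))' loop for a fixed size k
def zad6AltInner (T : List Int) (k : Int) : List Int → Option Int
  | [] => none
  | mask :: rest =>
    let idx := bitsB mask
    if ((idx.length : Int) == k) then
      match sumVals T idx with
      | none => none   -- Python raises IndexError here (outside Pre_)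
      | some v => if sumIdx idx == v then some (sumIdx idx) else zad6AltInner T k rest
    else zad6AltInner T k rest

-- outer 'for k in range(1, len(tab) + 1)' loop
def zad6AltOuter (T : List Int) : List Int → Option Int
  | [] => none
  | k :: ks =>
    match zad6AltInner T k (PySem.List.pyRange 1 ((1 : Int) <<< tabB.length) 1) with
    | some v => some v
    | none => zad6AltOuter T ks

def zad6_alt (T : List Int) : Option Int :=
  zad6AltOuter T (PySem.List.pyRange 1 ((tabB.length : Int) + 1) 1)

-- ===== PRECONDITION & SPEC =====
-- A indexes T[i] for every i < len(tab) = 6 (mask 63 sets all six bits), so the Python A raises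
-- IndexError exactly when len(T) < 6; Pre_ excludes precisely those inputs.
def Pre_zad6 (T : List Int) : Prop := 6 ≤ T.length
instance (T : List Int) : Decidable (Pre_zad6 T) := by unfold Pre_zad6; infer_instance
def pvWitness_zad6 : List Int := [1, 7, 3, 5, 11, 2]

def Spec_zad6 (T : List Int) (out : Option Int) : Prop := out = zad6_alt T
instance (T : List Int) (out : Option Int) : Decidable (Spec_zad6 T out) := by unfold Spec_zad6; infer_instance

-- ===== CLAIM (what is proved, stated in full; the proofs are below) =====
def Claim_equal_zad6 : Prop := ∀ (T : List Int), Dom_zad6 T → Pre_zad6 T → Spec_zad6 T (zad6 T)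

-- ===== LEMMAS AND PROOFS =====

-- proof-side abstractions (both ports are reduced to these)
def pvL (m : Int) : Int := ((bitsB m).length : Int)
def pvV (m : Int) : Int := sumIdx (bitsB m)

-- total value-sum (agrees with sumVals in range)
def sumValsD (T : List Int) : List Int → Int
  | [] => 0
  | i :: r => PySem.List.pyGetD T i 0 + sumValsD T r

def pvW (T : List Int) (m : Int) : Int := sumValsD T (bitsB m)
def pvP (T : List Int) (m : Int) : Bool := pvV m == pvW T m

def pvMasks : List Int := PySem.List.pyRange 1 ((1 : Int) <<< 6) 1

-- A-side index list computed by the peeling recursion, fuel-indexed like zad6InnerF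
def idxRecF : Nat → Int → Int → List Int
  | 0, _, _ => []
  | fuel + 1, m, i =>
    if 0 < m then
      (if PySem.Int.mod m 2 == 1 then [i] else []) ++ idxRecF fuel (PySem.Int.floordiv m 2) (i + 1)
    else []

-- the pure running-minimum fold (A's outer loop on the P-filtered masks)
def pstep (s : Option (Int × Int)) (m : Int) : Option (Int × Int) :=
  match s with
  | none => some (pvL m, pvV m)
  | some (bl, _) => if pvL m < bl then some (pvL m, pvV m) else s

-- size-major search spec (B's shape)
def gsearch : List Int → List Int → Option Int
  | [], _ => none
  | k :: ks, r =>
    match r.find? (fun m => pvL m == k) with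
    | some m => some (pvV m)
    | none => gsearch ks r

theorem pyget_some (xs : List Int) (i : Int) (h1 : 0 ≤ i) (h2 : i < (xs.length : Int)) :
    PySem.List.pyGet? xs i = some (PySem.List.pyGetD xs i 0) := by
  rw [PySem.List.pyGet?_eq_some_getElem xs h1 h2, PySem.List.pyGetD_eq_getElem xs 0 h1 h2]

-- A's inner while loop computes the bit-index list of idxRecF
theorem innerF_eq (T : List Int) :
    ∀ (fuel : Nat) (m i a b c : Int), 0 ≤ i → m.toNat < fuel →
    (∀ j ∈ idxRecF fuel m i, 0 ≤ j ∧ j < (T.length : Int)) →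
    zad6InnerF T fuel m i a b c =
      some (a + sumIdx (idxRecF fuel m i), b + sumValsD T (idxRecF fuel m i),
            c + ((idxRecF fuel m i).length : Int)) := by
  intro fuel
  induction fuel with
  | zero => intro m i a b c _ hf; omega
  | succ fuel ih =>
    intro m i a b c hi hf hj
    by_cases hm : 0 < m
    · have hq : (PySem.Int.floordiv m 2).toNat < fuel := by
        rw [PySem.Int.floordiv_eq_ediv_of_pos (by omega)]; omega
      have hmod : PySem.Int.mod m 2 = 0 ∨ PySem.Int.mod m 2 = 1 := by
        have h1 := PySem.Int.mod_nonneg m (b := 2) (by omega)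
        have h2 := PySem.Int.mod_lt m (b := 2) (by omega)
        omega
      rcases hmod with h01 | h01
      · have hb : (PySem.Int.mod m 2 == 1) = false := by rw [h01]; rfl
        have hidx : idxRecF (fuel + 1) m i = idxRecF fuel (PySem.Int.floordiv m 2) (i + 1) := by
          rw [idxRecF, if_pos hm, hb]; rfl
        rw [hidx] at hj ⊢
        have hstep : zad6InnerF T (fuel + 1) m i a b c =
            zad6InnerF T fuel (PySem.Int.floordiv m 2) (i + 1) a b (c + 0) := by
          simp only [zad6InnerF, if_pos hm, h01]; rfl
        rw [hstep, ih _ _ a b (c + 0) (by omega) hq hj]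
        simp only [Option.some.injEq, Prod.mk.injEq]
        refine ⟨trivial, trivial, ?_⟩
        omega
      · have hidx : idxRecF (fuel + 1) m i = i :: idxRecF fuel (PySem.Int.floordiv m 2) (i + 1) := by
          rw [idxRecF, if_pos hm, h01]; rfl
        rw [hidx] at hj ⊢
        have hib := hj i (by simp)
        have hg := pyget_some T i hib.1 hib.2
        have hstep : zad6InnerF T (fuel + 1) m i a b c =
            zad6InnerF T fuel (PySem.Int.floordiv m 2) (i + 1) (a + i)
              (b + PySem.List.pyGetD T i 0) (c + 1) := by
          simp only [zad6InnerF, if_pos hm, h01, hg]; rfl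
        rw [hstep, ih _ _ (a + i) (b + PySem.List.pyGetD T i 0) (c + 1) (by omega) hq
            (fun j hjm => hj j (List.mem_cons_of_mem _ hjm))]
        simp only [Option.some.injEq, Prod.mk.injEq, sumIdx, sumValsD, List.length_cons]
        refine ⟨by ring, by ring, by push_cast; ring⟩
    · rw [idxRecF, if_neg hm]
      simp [zad6InnerF, hm, sumIdx, sumValsD]
-- concrete facts about the 63 masks (kernel evaluation)
theorem idx_eq_bits : ∀ m ∈ pvMasks, idxRecF (m.toNat + 1) m 0 = bitsB m := by decide
theorem bits_bounds : ∀ m ∈ pvMasks, ∀ j ∈ bitsB m, 0 ≤ j ∧ j < 6 := by decide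
theorem pvL_range : ∀ m ∈ pvMasks, pvL m ∈ PySem.List.pyRange 1 7 1 := by decide
theorem ks_pairwise : (PySem.List.pyRange 1 7 1).Pairwise (· < ·) := by decide

theorem innerEval (T : List Int) (h6 : 6 ≤ T.length) :
    ∀ m ∈ pvMasks, zad6Inner T m = some (pvV m, pvW T m, pvL m) := by
  intro m hm
  have hb := bits_bounds m hm
  have hidx := idx_eq_bits m hm
  have := innerF_eq T (m.toNat + 1) m 0 0 0 0 (by omega) (by omega)
    (by rw [hidx]; intro j hjm; have := hb j hjm; constructor <;> [omega; exact_mod_cast (by omega : j < (6:Int)).trans_le (by exact_mod_cast h6)])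
  rw [hidx] at this
  simpa [zad6Inner, pvV, pvW, pvL] using this

-- A-side bridge: the port's fold equals the pure fold on the P-filtered list
theorem aloop_eq (T : List Int)
    (hin : ∀ m ∈ pvMasks, zad6Inner T m = some (pvV m, pvW T m, pvL m)) :
    ∀ ms, (∀ m ∈ ms, m ∈ pvMasks) → ∀ s : Option (Int × Int),
    zad6Loop T ms (s.map Prod.fst) (s.map Prod.snd) =
      ((ms.filter (pvP T)).foldl pstep s).map Prod.snd := by
  intro ms
  induction ms with
  | nil => intro _ s; rfl
  | cons m rest ih =>
    intro hsub s
    have hmem : m ∈ pvMasks := hsub m (by simp)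
    have hrest : ∀ x ∈ rest, x ∈ pvMasks := fun x hx => hsub x (by simp [hx])
    by_cases hp : pvP T m = true
    · have hvw : (pvV m == pvW T m) = true := hp
      cases s with
      | none =>
        show zad6Loop T (m :: rest) none none = _
        rw [zad6Loop, hin m hmem]
        simp only [hvw, List.filter_cons, hp]
        have := ih hrest (some (pvL m, pvV m))
        simpa [pstep] using this
      | some p =>
        obtain ⟨bl, bv⟩ := p
        show zad6Loop T (m :: rest) (some bl) (some bv) = _
        rw [zad6Loop, hin m hmem]
        simp only [hvw, List.filter_cons, hp]
        by_cases hlt : pvL m < bl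
        · have := ih hrest (some (pvL m, pvV m))
          simpa [pstep, hlt] using this
        · have := ih hrest (some (bl, bv))
          simpa [pstep, hlt] using this
    · have hvw : (pvV m == pvW T m) = false := by simpa [pvP] using hp
      cases s with
      | none =>
        show zad6Loop T (m :: rest) none none = _
        rw [zad6Loop, hin m hmem]
        simp only [hvw, List.filter_cons, hp]
        simpa using ih hrest none
      | some p =>
        obtain ⟨bl, bv⟩ := p
        show zad6Loop T (m :: rest) (some bl) (some bv) = _
        rw [zad6Loop, hin m hmem]
        simp only [hvw, List.filter_cons, hp]
        simpa using ih hrest (some (bl, bv))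

-- B-side bridges
theorem sumVals_eq (T : List Int) :
    ∀ idx, (∀ i ∈ idx, 0 ≤ i ∧ i < (T.length : Int)) →
    sumVals T idx = some (sumValsD T idx) := by
  intro idx
  induction idx with
  | nil => intro _; rfl
  | cons i r ih =>
    intro h
    have hi := h i (by simp)
    rw [sumVals, pyget_some T i hi.1 hi.2, ih (fun j hj => h j (by simp [hj]))]
    rfl

theorem bInner_eq (T : List Int) (h6 : 6 ≤ T.length) (k : Int) :
    ∀ ms, (∀ m ∈ ms, m ∈ pvMasks) →
    zad6AltInner T k ms = ((ms.filter (pvP T)).find? (fun m => pvL m == k)).map pvV := by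
  intro ms
  induction ms with
  | nil => intro _; rfl
  | cons m rest ih =>
    intro hsub
    have hmem : m ∈ pvMasks := hsub m (by simp)
    have hrest : ∀ x ∈ rest, x ∈ pvMasks := fun x hx => hsub x (by simp [hx])
    have hsv : sumVals T (bitsB m) = some (pvW T m) := by
      apply sumVals_eq
      intro i hi
      have := bits_bounds m hmem i hi
      constructor
      · omega
      · calc i < (6 : Int) := by omega
          _ ≤ (T.length : Int) := by exact_mod_cast h6
    rw [zad6AltInner]
    by_cases hk : (((bitsB m).length : Int) == k) = true
    · have hkL : ((fun m => pvL m == k) m) = true := by simpa [pvL] using hk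
      simp only [hk, hsv]
      by_cases hp : (sumIdx (bitsB m) == pvW T m) = true
      · have hpP : pvP T m = true := by simpa [pvP, pvV] using hp
        rw [List.filter_cons_of_pos hpP, List.find?_cons_of_pos (p := fun m => pvL m == k) hkL]
        simp [hp, pvV]
      · have hpP : ¬ pvP T m = true := by simpa [pvP, pvV] using hp
        rw [List.filter_cons_of_neg hpP]
        have hpf : (sumIdx (bitsB m) == pvW T m) = false := by simpa using hp
        simp only [hpf, Bool.false_eq_true, if_neg (by simp : ¬ False)]
        exact ih hrest
    · have hkL : ¬ ((fun m => pvL m == k) m) = true := by simpa [pvL] using hk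
      have hkf : (((bitsB m).length : Int) == k) = false := by simpa using hk
      simp only [hkf, Bool.false_eq_true, if_neg (by simp : ¬ False)]
      by_cases hp : pvP T m = true
      · rw [List.filter_cons_of_pos hp, List.find?_cons_of_neg (p := fun m => pvL m == k) hkL]
        exact ih hrest
      · rw [List.filter_cons_of_neg hp]
        exact ih hrest

theorem bOuter_eq (T : List Int) (h6 : 6 ≤ T.length) :
    ∀ ks, zad6AltOuter T ks = gsearch ks (pvMasks.filter (pvP T)) := by
  intro ks
  induction ks with
  | nil => rfl
  | cons k ks ih =>
    rw [zad6AltOuter, gsearch]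
    have hmask : PySem.List.pyRange 1 ((1 : Int) <<< tabB.length) 1 = pvMasks := by decide
    rw [hmask, bInner_eq T h6 k pvMasks (fun m hm => hm)]
    cases h : (pvMasks.filter (pvP T)).find? (fun m => pvL m == k) with
    | none => simpa using ih
    | some m => simp


-- running-minimum fold invariants
theorem pf_gt : ∀ (r : List Int) (k : Int), (∀ x ∈ r, k < pvL x) →
    ∀ s : Option (Int × Int), (s = none ∨ ∃ p, s = some p ∧ k < p.1) →
    (r.foldl pstep s = none ∨ ∃ p, r.foldl pstep s = some p ∧ k < p.1) := by
  intro r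
  induction r with
  | nil => intro k _ s hs; simpa using hs
  | cons m rest ih =>
    intro k hr s hs
    have hm : k < pvL m := hr m (by simp)
    apply ih k (fun x hx => hr x (by simp [hx]))
    rcases hs with hs | ⟨p, hp, hk⟩
    · right; exact ⟨(pvL m, pvV m), by simp [hs, pstep], hm⟩
    · right
      obtain ⟨bl, bv⟩ := p
      by_cases hlt : pvL m < bl
      · exact ⟨(pvL m, pvV m), by simp [hp, pstep, hlt], hm⟩
      · exact ⟨(bl, bv), by simp [hp, pstep, hlt], hk⟩

theorem pf_noup : ∀ (r : List Int) (bl bv : Int), (∀ x ∈ r, ¬ pvL x < bl) →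
    r.foldl pstep (some (bl, bv)) = some (bl, bv) := by
  intro r
  induction r with
  | nil => intro _ _ _; rfl
  | cons m rest ih =>
    intro bl bv h
    have hm := h m (by simp)
    simp only [List.foldl_cons, pstep, if_neg hm]
    exact ih bl bv (fun x hx => h x (by simp [hx]))

-- the key theorem: size-major first-hit search = running-minimum fold
theorem search_eq : ∀ (ks r : List Int), ks.Pairwise (· < ·) →
    (∀ x ∈ r, pvL x ∈ ks) →
    gsearch ks r = (r.foldl pstep none).map Prod.snd := by
  intro ks
  induction ks with
  | nil =>
    intro r _ hr
    cases r with
    | nil => rfl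
    | cons x r => exact absurd (hr x (by simp)) (by simp)
  | cons k ks ih =>
    intro r hpw hr
    have hklt : ∀ y ∈ ks, k < y := (List.pairwise_cons.mp hpw).1
    have hpw' : ks.Pairwise (· < ·) := (List.pairwise_cons.mp hpw).2
    rw [gsearch]
    cases hf : r.find? (fun m => pvL m == k) with
    | none =>
      have hne : ∀ x ∈ r, pvL x ∈ ks := by
        intro x hx
        have h1 := hr x hx
        have h2 : ¬ (pvL x == k) = true := List.find?_eq_none.mp hf x hx
        simp only [beq_iff_eq] at h2
        simpa [h2] using h1
      exact ih r hpw' hne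
    | some m =>
      obtain ⟨hpm, r1, r2, hsplit, hr1⟩ := List.find?_eq_some_iff_append.mp hf
      have hmk : pvL m = k := by simpa using hpm
      have hge : ∀ x ∈ r, k ≤ pvL x := by
        intro x hx
        rcases (by simpa using hr x hx : pvL x = k ∨ pvL x ∈ ks) with h | h
        · omega
        · exact le_of_lt (hklt _ h)
      have hr1gt : ∀ x ∈ r1, k < pvL x := by
        intro x hx
        have h1 : x ∈ r := by rw [hsplit]; simp [hx]
        have h2 : ¬ (pvL x == k) = true := by simpa using hr1 x hx
        simp only [beq_iff_eq] at h2
        have := hge x h1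
        omega
      have hs1 := pf_gt r1 k hr1gt none (Or.inl rfl)
      rw [hsplit, List.foldl_append, List.foldl_cons]
      have hstep : pstep (r1.foldl pstep none) m = some (k, pvV m) := by
        rcases hs1 with h | ⟨p, hp, hkp⟩
        · rw [h]; simp [pstep, hmk]
        · obtain ⟨bl, bv⟩ := p
          rw [hp]; simp only [pstep]; rw [if_pos (by simp at hkp; omega : pvL m < bl)]
          simp [hmk]
      rw [hstep, pf_noup r2 k (pvV m) (by
        intro x hx
        have : x ∈ r := by rw [hsplit]; simp [hx]
        have := hge x this
        omega)]
      rfl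

-- assembling the two sides
theorem zad6_eq_fold (T : List Int) (h6 : 6 ≤ T.length) :
    zad6 T = ((pvMasks.filter (pvP T)).foldl pstep none).map Prod.snd := by
  have hmask : PySem.List.pyRange 1 ((1 : Int) <<< tabA.length) 1 = pvMasks := by decide
  have := aloop_eq T (innerEval T h6) pvMasks (fun m hm => hm) none
  simpa [zad6, hmask] using this

theorem zad6_alt_eq_search (T : List Int) (h6 : 6 ≤ T.length) :
    zad6_alt T = gsearch (PySem.List.pyRange 1 7 1) (pvMasks.filter (pvP T)) := by
  have hks : PySem.List.pyRange 1 ((tabB.length : Int) + 1) 1 = PySem.List.pyRange 1 7 1 := by decide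
  rw [zad6_alt, hks, bOuter_eq T h6]

-- ===== VERDICT (by name: the statement is the Claim_ definition above) =====
theorem zad6_spec : Claim_equal_zad6 := by
  intro T _ hpre
  unfold Spec_zad6
  have h6 : 6 ≤ T.length := hpre
  rw [zad6_eq_fold T h6, zad6_alt_eq_search T h6]
  rw [search_eq (PySem.List.pyRange 1 7 1) (pvMasks.filter (pvP T)) ks_pairwise
      (fun x hx => pvL_range x (List.mem_of_mem_filter hx))]
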